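-- pv_equiv track=rewrite | github.com/saraitne11/CodingTest | SamsungSWExpert/SamsungProblem5656/Problem5656.py | get_surface
-- ===== SOURCE A (Python) =====
-- def get_surface(matrix):
--     n = len(matrix)         # h
--     m = len(matrix[0])      # w
--     surfaces = [(-1, j) for j in range(m)]
--
--     for j in range(m):
--         for i in range(n):
--             if matrix[i][j] != 0:
--                 surfaces[j] = (i, j)
--                 break
--
--     return surfaces
-- ===== SOURCE B (Python) =====
-- def get_surface(matrix):
--     m = len(matrix[0])
--     first = {}
--     for i, row in enumerate(matrix):
--         for j in range(m):
--             if row[j] != 0 and j not in first: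
--                 first[j] = i
--     return [(first.get(j, -1), j) for j in range(m)]
-- ===== Notes on version B (the rewrite author's own statement) =====
-- stated objective: alternative
-- what changed: Replaces the column-major scan with break and in-place list assignment by a single row-major sweep that records the first row index per column in a dict, then builds the result from the dict.
-- outside the precondition, e.g. on get_surface([[0, 1], [1]]): A returns [(1, 0), (0, 1)], B raises IndexError
import Mathlib
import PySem

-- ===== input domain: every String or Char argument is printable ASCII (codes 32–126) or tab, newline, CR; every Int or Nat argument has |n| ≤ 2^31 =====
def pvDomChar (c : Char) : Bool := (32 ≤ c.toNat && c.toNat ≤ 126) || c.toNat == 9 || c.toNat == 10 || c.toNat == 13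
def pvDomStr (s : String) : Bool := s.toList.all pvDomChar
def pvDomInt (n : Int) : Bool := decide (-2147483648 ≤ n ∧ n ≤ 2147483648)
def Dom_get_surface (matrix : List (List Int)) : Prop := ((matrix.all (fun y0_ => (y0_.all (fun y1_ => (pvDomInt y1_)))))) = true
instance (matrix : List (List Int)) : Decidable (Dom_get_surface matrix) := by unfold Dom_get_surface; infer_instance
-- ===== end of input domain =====

-- B replaces A's column-major scan with break by one row-major sweep recording the first row per column in a dict; equivalence proved for nonempty matrices whose rows all have at least len(matrix[0]) entries.

-- B replaces A's column-major scan-with-break and in-place assignment by one row-major sweep recording the first nonzero row per column in a dict; equivalence proved on nonempty matrices whose rows all have at least len(matrix[0]) entries.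

-- ===== PORT A =====
-- inner 'for i in range(n): if matrix[i][j] != 0: surfaces[j] = (i, j); break' — the first i hit, none if no break
def firstHitA (matrix : List (List Int)) (j : Int) : List Int → Option Int
  | [] => none
  | i :: is =>
      if PySem.List.pyGetD (PySem.List.pyGetD matrix i []) j 0 ≠ 0 then some i
      else firstHitA matrix j is

def get_surface (matrix : List (List Int)) : List (Int × Int) :=
  let n : Int := matrix.length
  let m : Int := (PySem.List.pyGetD matrix 0 []).length
  let surfaces := (PySem.List.pyRange 0 m 1).map (fun j => ((-1 : Int), j))
  (PySem.List.pyRange 0 m 1).foldl (fun s j =>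
    match firstHitA matrix j (PySem.List.pyRange 0 n 1) with
    | some i => PySem.List.pySetD s j (i, j)
    | none => s) surfaces

-- ===== PORT B =====
def get_surface_alt (matrix : List (List Int)) : List (Int × Int) :=
  let m : Int := (PySem.List.pyGetD matrix 0 []).length
  let first : PySem.Dict Int Int :=
    (PySem.List.enumerate matrix 0).foldl (fun d p =>
      (PySem.List.pyRange 0 m 1).foldl (fun d j =>
        if PySem.List.pyGetD p.2 j 0 ≠ 0 ∧ d.get? j = none then d.insert j p.1 else d) d)
      PySem.Dict.empty
  (PySem.List.pyRange 0 m 1).map (fun j => (first.getD j (-1), j))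

-- ===== PRECONDITION & SPEC =====
-- Pre_ excludes the empty matrix (A raises IndexError on matrix[0]) and matrices having a row with
-- fewer than len(matrix[0]) entries, on which A's column scan can raise IndexError; it thereby also
-- excludes some ragged matrices on which A's early break happens to avoid the IndexError.
def Pre_get_surface (matrix : List (List Int)) : Prop :=
  matrix ≠ [] ∧ ∀ row ∈ matrix, (matrix.headI).length ≤ row.length
instance (matrix : List (List Int)) : Decidable (Pre_get_surface matrix) := by
  unfold Pre_get_surface; infer_instance
def pvWitness_get_surface : List (List Int) := [[0, 3, 0], [1, 0, 0]]
def Spec_get_surface (matrix : List (List Int)) (out : List (Int × Int)) : Prop := out = get_surface_alt matrix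
instance (matrix : List (List Int)) (out : List (Int × Int)) : Decidable (Spec_get_surface matrix out) := by unfold Spec_get_surface; infer_instance

-- ===== CLAIM (what is proved, stated in full; the proofs are below) =====
def Claim_equal_get_surface : Prop := ∀ (matrix : List (List Int)), Dom_get_surface matrix → Pre_get_surface matrix → Spec_get_surface matrix (get_surface matrix)

-- ===== LEMMAS AND PROOFS =====

-- first row index ≥ s (counting from s) whose entry in column j is nonzero
def firstIdx (j : Int) (s : Int) : List (List Int) → Option Int
  | [] => none
  | row :: rest =>
      if PySem.List.pyGetD row j 0 ≠ 0 then some s else firstIdx j (s + 1) rest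

theorem firstHitA_eq_firstIdx (matrix : List (List Int)) (j : Int) :
    ∀ (suf pre : List (List Int)), matrix = pre ++ suf →
      firstHitA matrix j (PySem.List.pyRange pre.length matrix.length 1) = firstIdx j pre.length suf := by
  intro suf
  induction suf with
  | nil =>
      intro pre h
      subst h
      rw [PySem.List.pyRange_one_eq_nil (by simp)]
      rfl
  | cons row rest ih =>
      intro pre h
      have hlt : (pre.length : Int) < matrix.length := by
        subst h; simp
      rw [PySem.List.pyRange_one_cons hlt]
      show (if PySem.List.pyGetD (PySem.List.pyGetD matrix (pre.length : Int) []) j 0 ≠ 0 then some (pre.length : Int)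
            else firstHitA matrix j (PySem.List.pyRange ((pre.length : Int)+1) matrix.length 1)) = _
      have hrow : PySem.List.pyGetD matrix (pre.length : Int) [] = row := by
        subst h
        simp [PySem.List.pyGetD_natCast, List.getD]
      rw [hrow]
      show _ = (if PySem.List.pyGetD row j 0 ≠ 0 then some (pre.length : Int) else firstIdx j ((pre.length : Int) + 1) rest)
      split
      · rfl
      · have h2 : matrix = (pre ++ [row]) ++ rest := by simp [h]
        have := ih (pre ++ [row]) h2
        simpa [Nat.cast_add] using this

theorem innerB_get? (i : Int) (row : List Int) :
    ∀ (l : List Int) (d : PySem.Dict Int Int) (j : Int),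
      ((l.foldl (fun d j =>
        if PySem.List.pyGetD row j 0 ≠ 0 ∧ d.get? j = none then d.insert j i else d) d).get? j)
      = if j ∈ l ∧ d.get? j = none ∧ PySem.List.pyGetD row j 0 ≠ 0 then some i else d.get? j := by
  intro l
  induction l with
  | nil => intro d j; simp
  | cons a t ih =>
      intro d j
      rw [List.foldl_cons, ih]
      by_cases hja : j = a
      · subst hja
        by_cases hc : PySem.List.pyGetD row j 0 ≠ 0 ∧ d.get? j = none
        · simp [hc.1, hc.2, PySem.Dict.get?_insert_self]
        · rw [if_neg hc]
          push_neg at hc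
          by_cases hz : PySem.List.pyGetD row j 0 = 0
          · simp [hz]
          · simp [hz, hc hz]
      · have hne : (if PySem.List.pyGetD row a 0 ≠ 0 ∧ d.get? a = none then d.insert a i else d).get? j = d.get? j := by
          split
          · exact PySem.Dict.get?_insert_of_ne _ _ hja
          · rfl
        rw [hne]
        simp [hja]

theorem outerB_get? (m j : Int) (hj : j ∈ PySem.List.pyRange 0 m 1) :
    ∀ (suf : List (List Int)) (s : Int) (d : PySem.Dict Int Int),
      (((PySem.List.enumerate suf s).foldl (fun d p =>
          (PySem.List.pyRange 0 m 1).foldl (fun d j =>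
            if PySem.List.pyGetD p.2 j 0 ≠ 0 ∧ d.get? j = none then d.insert j p.1 else d) d) d).get? j)
      = match d.get? j with
        | some v => some v
        | none => firstIdx j s suf := by
  intro suf
  induction suf with
  | nil =>
      intro s d
      simp [PySem.List.enumerate_nil, firstIdx]
      cases d.get? j <;> rfl
  | cons row rest ih =>
      intro s d
      rw [PySem.List.enumerate_cons, List.foldl_cons, ih]
      rw [innerB_get? s row (PySem.List.pyRange 0 m 1) d j]
      cases hd : d.get? j with
      | some v => simp
      | none =>
          by_cases hz : PySem.List.pyGetD row j 0 ≠ 0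
          · simp [hj, hz, firstIdx]
          · push_neg at hz
            simp [hz, firstIdx]

theorem foldlA_length (matrix : List (List Int)) (n : Int) :
    ∀ (l : List Int) (s : List (Int × Int)),
      (l.foldl (fun s j =>
        match firstHitA matrix j (PySem.List.pyRange 0 n 1) with
        | some i => PySem.List.pySetD s j (i, j)
        | none => s) s).length = s.length := by
  intro l
  induction l with
  | nil => intro s; rfl
  | cons a t ih =>
      intro s
      rw [List.foldl_cons, ih]
      split
      · simp [PySem.List.length_pySetD]
      · rfl

theorem foldlA_getElem? (matrix : List (List Int)) (n : Int) :
    ∀ (l : List Int) (s : List (Int × Int)), (∀ j ∈ l, 0 ≤ j ∧ j.toNat < s.length) →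
      ∀ (k : Nat) (hk : k < s.length),
      (l.foldl (fun s j =>
        match firstHitA matrix j (PySem.List.pyRange 0 n 1) with
        | some i => PySem.List.pySetD s j (i, j)
        | none => s) s)[k]?
      = some (if (k : Int) ∈ l then
            (match firstHitA matrix (k : Int) (PySem.List.pyRange 0 n 1) with
             | some i => (i, (k : Int))
             | none => s[k])
          else s[k]) := by
  intro l
  induction l with
  | nil =>
      intro s hb k hk
      simp [List.getElem?_eq_getElem hk]
  | cons a t ih =>
      intro s hb k hk
      rw [List.foldl_cons]
      have ha := hb a (by simp)
      by_cases hak : a = (k : Int)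
      · subst hak
        cases hfa : firstHitA matrix (k : Int) (PySem.List.pyRange 0 n 1) with
        | some i =>
            have hlen : (PySem.List.pySetD s (k : Int) (i, (k : Int))).length = s.length := by
              simp
            rw [ih (PySem.List.pySetD s (k : Int) (i, (k : Int)))
                  (by intro j hj; rw [hlen]; exact hb j (by simp [hj])) k (by omega)]
            have hs1 : (PySem.List.pySetD s (k : Int) (i, (k : Int)))[k]'(by omega) = (i, (k : Int)) := by
              simp only [PySem.List.pySetD_of_nonneg _ _ (Int.natCast_nonneg k), Int.toNat_natCast]
              simp [List.getElem_set_self]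
            simp [hfa]
        | none =>
            rw [ih s (fun j hj => hb j (List.mem_cons_of_mem _ hj)) k hk]
            simp [hfa]
      · have hs1 : ∀ s1, s1 = (match firstHitA matrix a (PySem.List.pyRange 0 n 1) with
              | some i => PySem.List.pySetD s a (i, a)
              | none => s) → s1.length = s.length ∧ s1[k]? = s[k]? := by
          intro s1 h1
          subst h1
          split
          · constructor
            · simp [PySem.List.length_pySetD]
            · rw [PySem.List.pySetD_of_nonneg _ _ ha.1]
              apply List.getElem?_set_ne
              omega
          · exact ⟨rfl, rfl⟩
        obtain ⟨hl1, hg1⟩ := hs1 _ rfl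
        rw [ih _ (by intro j hj; rw [hl1]; exact hb j (by simp [hj])) k (by omega)]
        have hk' : k < s.length := hk
        have hsk : (match firstHitA matrix a (PySem.List.pyRange 0 n 1) with
              | some i => PySem.List.pySetD s a (i, a)
              | none => s)[k]'(by omega) = s[k] := by
          have := hg1
          rw [List.getElem?_eq_getElem (by omega), List.getElem?_eq_getElem hk'] at this
          exact Option.some_injective _ this
        rw [hsk]
        have hmem : ((k : Int) ∈ a :: t) ↔ ((k : Int) ∈ t) := by
          simp [List.mem_cons, Ne.symm hak]
        simp only [hmem]
theorem main_eq (matrix : List (List Int)) : get_surface matrix = get_surface_alt matrix := by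
  simp only [get_surface, get_surface_alt]
  set M : Int := ((PySem.List.pyGetD matrix 0 []).length : Int) with hM
  set F : PySem.Dict Int Int :=
    (PySem.List.enumerate matrix 0).foldl (fun d p =>
      (PySem.List.pyRange 0 M 1).foldl (fun d j =>
        if PySem.List.pyGetD p.2 j 0 ≠ 0 ∧ d.get? j = none then d.insert j p.1 else d) d)
      PySem.Dict.empty with hF
  have hFk : ∀ k : Nat, k < M.toNat → F.get? (k : Int) = firstIdx (k : Int) 0 matrix := by
    intro k hk
    have hmemk : ((k : Int)) ∈ PySem.List.pyRange 0 M 1 := by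
      rw [PySem.List.mem_pyRange_one]
      exact ⟨Int.natCast_nonneg k, by omega⟩
    rw [hF, outerB_get? M (k : Int) hmemk matrix 0 PySem.Dict.empty]
    have he : (PySem.Dict.empty : PySem.Dict Int Int).get? (k : Int) = none := rfl
    rw [he]
  have hlinit : ((PySem.List.pyRange 0 M 1).map (fun j => ((-1 : Int), j))).length = M.toNat := by
    simp [PySem.List.length_pyRange_one]
  apply List.ext_getElem?
  intro k
  by_cases hk : k < M.toNat
  · rw [foldlA_getElem? matrix (matrix.length : Int) (PySem.List.pyRange 0 M 1) _
        (by intro j hj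
            have := (PySem.List.mem_pyRange_one).1 hj
            exact ⟨this.1, by rw [hlinit]; omega⟩)
        k (by rw [hlinit]; exact hk)]
    have hmemk : ((k : Int)) ∈ PySem.List.pyRange 0 M 1 := by
      rw [PySem.List.mem_pyRange_one]
      exact ⟨Int.natCast_nonneg k, by omega⟩
    have hinitk : ((PySem.List.pyRange 0 M 1).map (fun j => ((-1 : Int), j)))[k]'(by rw [hlinit]; exact hk) = ((-1 : Int), (k : Int)) := by
      simp [PySem.List.getElem_pyRange_one]
    rw [if_pos hmemk, hinitk]
    have hlr : k < ((PySem.List.pyRange 0 M 1).map (fun j => (F.getD j (-1), j))).length := by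
      simp [PySem.List.length_pyRange_one]
      omega
    rw [List.getElem?_eq_getElem hlr, List.getElem_map, PySem.List.getElem_pyRange_one]
    have hfh : firstHitA matrix (k : Int) (PySem.List.pyRange 0 (matrix.length : Int) 1) = firstIdx (k : Int) 0 matrix := by
      have h := firstHitA_eq_firstIdx matrix (k : Int) matrix [] rfl
      simpa using h
    have hgd : F.getD (0 + (k : Int)) (-1) = (F.get? (0 + (k : Int))).getD (-1) := rfl
    rw [hfh, hgd]
    have h0k : (0 + (k : Int)) = (k : Int) := by omega
    rw [h0k, hFk k hk]
    cases firstIdx (k : Int) 0 matrix <;> simp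
  · rw [List.getElem?_eq_none, List.getElem?_eq_none]
    · simp [PySem.List.length_pyRange_one]
      omega
    · rw [foldlA_length, hlinit]
      omega

-- ===== VERDICT (by name: the statement is the Claim_ definition above) =====
theorem get_surface_spec : Claim_equal_get_surface := by
  intro matrix _hdom _hpre
  show get_surface matrix = get_surface_alt matrix
  exact main_eq matrix
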